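-- pv_equiv track=rewrite | github.com/GaryPate/acbot_rnn_public | acbot_rnn_module.py | labelbal
-- ===== SOURCE A (Python) =====
-- def labelbal(x):
--     if all(x_ == 0 for x_ in x):
--         return 0
--     elif any(x_ == 1 for x_ in x):
--         return 1
--     elif any(x_ == 2 for x_ in x):
--         return 2
--     else:
--         return 0
-- ===== SOURCE B (Python) =====
-- def labelbal(x):
--     all_zero = True
--     saw1 = False
--     saw2 = False
--     for v in x:
--         if v != 0:
--             all_zero = False
--         if v == 1:
--             saw1 = True
--         if v == 2:
--             saw2 = True
--     if all_zero:
--         return 0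
--     elif saw1:
--         return 1
--     elif saw2:
--         return 2
--     else:
--         return 0
-- ===== Notes on version B (the rewrite author's own statement) =====
-- stated objective: alternative
-- what changed: Replaced A's three separate all/any generator scans with a single pass maintaining three boolean flags (all_zero, saw1, saw2) decided after the loop.
import Mathlib
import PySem

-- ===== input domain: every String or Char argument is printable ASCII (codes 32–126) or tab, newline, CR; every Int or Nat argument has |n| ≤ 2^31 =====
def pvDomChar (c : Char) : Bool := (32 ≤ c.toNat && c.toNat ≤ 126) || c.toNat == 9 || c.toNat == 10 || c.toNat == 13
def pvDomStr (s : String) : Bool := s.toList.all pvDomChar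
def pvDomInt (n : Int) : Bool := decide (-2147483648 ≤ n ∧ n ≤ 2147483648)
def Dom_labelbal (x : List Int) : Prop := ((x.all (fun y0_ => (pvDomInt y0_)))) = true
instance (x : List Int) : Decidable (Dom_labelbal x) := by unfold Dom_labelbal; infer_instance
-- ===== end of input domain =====

-- ===== PORT A =====
-- one honest line: B fuses A's three separate all/any scans into one pass with three boolean flags.
def labelbal (x : List Int) : Int :=
  if x.all (fun x_ => x_ == 0) then 0
  else if x.any (fun x_ => x_ == 1) then 1
  else if x.any (fun x_ => x_ == 2) then 2
  else 0

-- ===== PORT B =====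
def labelbal_alt (x : List Int) : Int :=
  let st := x.foldl (fun (st : Bool × Bool × Bool) v =>
      (if v ≠ 0 then false else st.1,
       if v = 1 then true else st.2.1,
       if v = 2 then true else st.2.2)) (true, false, false)
  if st.1 then 0 else if st.2.1 then 1 else if st.2.2 then 2 else 0

-- ===== PRECONDITION & SPEC =====
def Spec_labelbal (x : List Int) (out : Int) : Prop := out = labelbal_alt x
instance (x : List Int) (out : Int) : Decidable (Spec_labelbal x out) := by unfold Spec_labelbal; infer_instance

-- ===== CLAIM (what is proved, stated in full; the proofs are below) =====
def Claim_equal_labelbal : Prop := ∀ (x : List Int), Dom_labelbal x → Spec_labelbal x (labelbal x)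

-- ===== LEMMAS AND PROOFS =====

-- ===== VERDICT (by name: the statement is the Claim_ definition above) =====
lemma labelbal_fold_char (x : List Int) (a b c : Bool) :
    x.foldl (fun (st : Bool × Bool × Bool) v =>
      (if v ≠ 0 then false else st.1,
       if v = 1 then true else st.2.1,
       if v = 2 then true else st.2.2)) (a, b, c)
    = ((a && x.all (fun x_ => x_ == 0)),
       (b || x.any (fun x_ => x_ == 1)),
       (c || x.any (fun x_ => x_ == 2))) := by
  induction x generalizing a b c with
  | nil => simp
  | cons h t ih =>
      simp only [List.foldl_cons, List.all_cons, List.any_cons, ih]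
      rcases eq_or_ne h 0 with h0 | h0
      · subst h0; simp
      · rcases eq_or_ne h 1 with h1 | h1
        · subst h1; simp
        · rcases eq_or_ne h 2 with h2 | h2
          · subst h2; simp
          · simp [h0, h1, h2, beq_eq_false_iff_ne.mpr h1, beq_eq_false_iff_ne.mpr h2]

theorem labelbal_spec : Claim_equal_labelbal := by
  intro x _
  unfold Spec_labelbal labelbal labelbal_alt
  simp only [labelbal_fold_char, Bool.true_and, Bool.false_or]
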